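-- pv_equiv track=rewrite | github.com/Yiluo-pHoton/ieeextreme11.0 | IEEEXtreme/quipu.py | getAllPrimes
-- ===== SOURCE A (Python) =====
-- import math
--
-- def getAllPrimes(n, d):
--     array = [True] * (n + 1)
--     for i in range(2, int(math.sqrt(n) + 1)):
--         if array[i]:
--             for j in range(i**2, n + 1, i):
--                 array[j] = False
--     counter = 0
--     for i in range(2, n + 1):
--         if array[i] and i != d:
--             counter += 1
--     return counter
-- ===== SOURCE B (Python) =====
-- import math
--
-- def getAllPrimes(n, d):
--     counter = 0
--     for i in range(2, n + 1):
--         if all(i % j for j in range(2, math.isqrt(i) + 1)) and i != d: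
--             counter += 1
--     return counter
-- ===== Notes on version B (the rewrite author's own statement) =====
-- stated objective: alternative
-- what changed: Replaced the boolean sieve array with independent per-number trial division up to isqrt(i), counting in a single pass with no array.
-- crash fix: For n < 0 A raises ValueError (math.sqrt of a negative number) while B's empty range loop returns 0. — e.g. on getAllPrimes(-5, 0): A raises ValueError, B returns 0
import Mathlib
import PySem

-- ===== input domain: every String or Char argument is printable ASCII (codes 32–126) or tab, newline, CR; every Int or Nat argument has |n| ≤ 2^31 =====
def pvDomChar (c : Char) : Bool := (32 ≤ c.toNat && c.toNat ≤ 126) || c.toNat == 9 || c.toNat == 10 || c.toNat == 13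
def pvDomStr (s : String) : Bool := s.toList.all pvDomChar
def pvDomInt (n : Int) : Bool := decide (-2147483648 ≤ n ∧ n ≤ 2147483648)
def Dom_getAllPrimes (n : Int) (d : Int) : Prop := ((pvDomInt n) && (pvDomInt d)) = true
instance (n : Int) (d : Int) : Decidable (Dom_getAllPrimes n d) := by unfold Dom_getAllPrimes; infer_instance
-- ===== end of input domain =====

-- B replaces A's sieve array with independent per-number trial division (alternative algorithm, no array).

-- ===== PORT A =====
-- inner loop 'for j in range(i**2, n+1, i): array[j] = False'; every j ≥ i² ≥ 0, so j.toNat indexing is exact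
def pvMarkMultiples (n : Int) (a : List Bool) (i : Int) : List Bool :=
  (PySem.List.pyRange (i ^ 2) (n + 1) i).foldl (fun a j => a.set j.toNat false) a

-- one outer step 'if array[i]: <mark multiples of i>'
def pvSieveStep (n : Int) (a : List Bool) (i : Int) : List Bool :=
  if a.getD i.toNat false then pvMarkMultiples n a i else a

-- 'int(math.sqrt(n) + 1)' is ported as (Nat.sqrt n.toNat + 1 : Int) — exact for 0 ≤ n ≤ 2^31 (the float
-- sqrt is more than precise enough there); '[True] * (n + 1)' is List.replicate (n+1).toNat true.
def getAllPrimes (n : Int) (d : Int) : Int :=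
  let arr := (PySem.List.pyRange 2 ((Nat.sqrt n.toNat : Int) + 1)).foldl (pvSieveStep n)
      (List.replicate (n + 1).toNat true)
  (PySem.List.pyRange 2 (n + 1)).foldl
    (fun c i => if arr.getD i.toNat false && (i != d) then c + 1 else c) 0

-- ===== PORT B =====
-- 'all(i % j for j in range(2, math.isqrt(i) + 1))'; math.isqrt is Nat.sqrt on the nonnegative i tested
def pvTrialPrime (i : Int) : Bool :=
  (PySem.List.pyRange 2 ((Nat.sqrt i.toNat : Int) + 1)).all (fun j => PySem.Int.mod i j != 0)

def getAllPrimes_alt (n : Int) (d : Int) : Int :=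
  (PySem.List.pyRange 2 (n + 1)).foldl
    (fun c i => if pvTrialPrime i && (i != d) then c + 1 else c) 0

-- ===== PRECONDITION & SPEC =====
-- Pre_ excludes exactly n < 0, where Python A raises ValueError (math.sqrt of a negative number).
def Pre_getAllPrimes (n : Int) (d : Int) : Prop := 0 ≤ n
instance (n : Int) (d : Int) : Decidable (Pre_getAllPrimes n d) := by unfold Pre_getAllPrimes; infer_instance
def pvWitness_getAllPrimes : Int × Int := (30, 7)

-- For n < 0 A raises ValueError via math.sqrt(n), while B's loop over the empty range(2, n+1) returns 0.
def Raises_getAllPrimes (n : Int) (d : Int) : Prop := n < 0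
instance (n : Int) (d : Int) : Decidable (Raises_getAllPrimes n d) := by unfold Raises_getAllPrimes; infer_instance
def pvRaiseWitness_getAllPrimes : Int × Int := (-5, 0)
def pvRaiseWitnessOut_getAllPrimes : Int := 0

def Spec_getAllPrimes (n : Int) (d : Int) (out : Int) : Prop := out = getAllPrimes_alt n d
instance (n : Int) (d : Int) (out : Int) : Decidable (Spec_getAllPrimes n d out) := by unfold Spec_getAllPrimes; infer_instance

-- ===== CLAIM (what is proved, stated in full; the proofs are below) =====
def Claim_equal_getAllPrimes : Prop := ∀ (n : Int) (d : Int), Dom_getAllPrimes n d → Pre_getAllPrimes n d → Spec_getAllPrimes n d (getAllPrimes n d)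
def Claim_raises_getAllPrimes : Prop := (∀ (n : Int) (d : Int), Dom_getAllPrimes n d → Raises_getAllPrimes n d → ¬ Pre_getAllPrimes n d) ∧ (Dom_getAllPrimes (pvRaiseWitness_getAllPrimes.1) (pvRaiseWitness_getAllPrimes.2) ∧ Raises_getAllPrimes (pvRaiseWitness_getAllPrimes.1) (pvRaiseWitness_getAllPrimes.2) ∧ getAllPrimes_alt (pvRaiseWitness_getAllPrimes.1) (pvRaiseWitness_getAllPrimes.2) = pvRaiseWitnessOut_getAllPrimes)

-- ===== LEMMAS AND PROOFS =====

-- j is already struck out by some stride 2 ≤ t < k with t² ≤ j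
def pvMarked (k j : Int) : Prop := ∃ t : Int, 2 ≤ t ∧ t < k ∧ t ∣ j ∧ t * t ≤ j

theorem pv_getD_set_false (a : List Bool) (k m : Nat) :
    (a.set k false).getD m false = ((!(k == m)) && a.getD m false) := by
  by_cases h : k = m
  · subst h
    have hL : (a.set k false)[k]?.getD false = false := by
      by_cases hl : k < a.length
      · have hs : (a.set k false)[k]? = some false := by
          rw [List.getElem?_set]; simp [hl]
        simp [hs]
      · have hs : (a.set k false)[k]? = none := by
          apply List.getElem?_eq_none; simp; omega
        simp [hs]
    simp [List.getD_eq_getElem?_getD, hL]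
  · have hs : (a.set k false)[m]? = a[m]? := by
      rw [List.getElem?_set]; simp [h]
    simp [List.getD_eq_getElem?_getD, hs, h]

theorem pv_getD_foldl_set (js : List Int) (a : List Bool) (m : Nat) :
    (js.foldl (fun a j => a.set j.toNat false) a).getD m false
      = ((!js.any (fun j => j.toNat == m)) && a.getD m false) := by
  induction js generalizing a with
  | nil => simp
  | cons j js ih =>
    simp only [List.foldl_cons, List.any_cons, ih, pv_getD_set_false, Bool.not_or]
    cases h : (j.toNat == m) <;> cases hr : js.any (fun j => j.toNat == m) <;> simp_all

theorem pv_getD_markMultiples (n i : Int) (hi : 2 ≤ i) (a : List Bool) (m : Nat) :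
    ((pvMarkMultiples n a i).getD m false = true)
      ↔ (¬(i ∣ (m : Int) ∧ i * i ≤ (m : Int) ∧ (m : Int) ≤ n) ∧ a.getD m false = true) := by
  unfold pvMarkMultiples
  rw [pv_getD_foldl_set]
  have hmem : ((PySem.List.pyRange (i ^ 2) (n + 1) i).any (fun j => j.toNat == m) = true)
      ↔ (i ∣ (m : Int) ∧ i * i ≤ (m : Int) ∧ (m : Int) ≤ n) := by
    rw [List.any_eq_true]
    constructor
    · rintro ⟨j, hj, hjm⟩
      rw [PySem.List.mem_pyRange_iff_of_pos (by omega)] at hj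
      obtain ⟨h1, h2, h3⟩ := hj
      have hj0 : 0 ≤ j := le_trans (by positivity) h1
      have hjm' : j = (m : Int) := by
        have := beq_iff_eq.mp hjm
        omega
      subst hjm'
      have hii : i ∣ (i ^ 2 : Int) := dvd_pow_self i (by norm_num)
      have hd : i ∣ (m : Int) := by
        have h4 := dvd_add h3 hii
        simpa using h4
      exact ⟨hd, by nlinarith, by omega⟩
    · rintro ⟨hd, hsq, hn⟩
      refine ⟨(m : Int), ?_, by simp⟩
      rw [PySem.List.mem_pyRange_iff_of_pos (by omega)]
      refine ⟨by nlinarith, by omega, ?_⟩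
      have : i ∣ (i ^ 2 : Int) := dvd_pow_self i (by norm_num)
      exact dvd_sub hd this
  constructor
  · intro h
    have := Bool.and_eq_true_iff.mp h
    refine ⟨?_, this.2⟩
    intro hc
    have : (PySem.List.pyRange (i ^ 2) (n + 1) i).any (fun j => j.toNat == m) = true := hmem.mpr hc
    simp [this] at h
  · rintro ⟨hnot, ha⟩
    have : (PySem.List.pyRange (i ^ 2) (n + 1) i).any (fun j => j.toNat == m) = false := by
      rw [← Bool.not_eq_true]; intro hc; exact hnot (hmem.mp hc)
    simpa [this, List.getD_eq_getElem?_getD] using ha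

theorem pvMarked_succ (i j : Int) (hi : 2 ≤ i) :
    pvMarked (i + 1) j ↔ (pvMarked i j ∨ (i ∣ j ∧ i * i ≤ j)) := by
  constructor
  · rintro ⟨t, h1, h2, h3, h4⟩
    rcases lt_or_eq_of_le (by omega : t ≤ i) with h | h
    · exact Or.inl ⟨t, h1, h, h3, h4⟩
    · subst h; exact Or.inr ⟨h3, h4⟩
  · rintro (⟨t, h1, h2, h3, h4⟩ | ⟨h3, h4⟩)
    · exact ⟨t, h1, by omega, h3, h4⟩
    · exact ⟨i, hi, by omega, h3, h4⟩

theorem pvSieve_inv (n : Int) (hn : 0 ≤ n) (K : Nat) : ∀ m : Nat,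
    (((PySem.List.pyRange 2 (2 + (K : Int))).foldl (pvSieveStep n)
        (List.replicate (n + 1).toNat true)).getD m false = true)
      ↔ ((m : Int) ≤ n ∧ ¬ pvMarked (2 + (K : Int)) (m : Int)) := by
  induction K with
  | zero =>
    intro m
    rw [show ((2 : Int) + (0 : Nat)) = 2 by norm_num, PySem.List.pyRange_one_eq_nil (by omega)]
    simp only [List.foldl_nil]
    constructor
    · intro h
      have hm : m < (n + 1).toNat := by
        by_contra hc
        rw [List.getD_eq_default] at h
        · exact absurd h (by simp)
        · simpa using by omega
      refine ⟨by omega, ?_⟩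
      rintro ⟨t, h1, h2, _, _⟩; omega
    · rintro ⟨hm, _⟩
      rw [List.getD_replicate]
      omega
  | succ K ih =>
    intro m
    have hcast : ((2 : Int) + ((K + 1 : Nat) : Int)) = (2 + (K : Int)) + 1 := by push_cast; ring
    rw [hcast, PySem.List.pyRange_one_succ_right (by omega), List.foldl_append, List.foldl_cons,
      List.foldl_nil]
    set i : Int := 2 + (K : Int) with hidef
    have hi2 : 2 ≤ i := by omega
    have hitn : ((i.toNat : Int)) = i := Int.toNat_of_nonneg (by omega)
    set S := (PySem.List.pyRange 2 i).foldl (pvSieveStep n) (List.replicate (n + 1).toNat true) with hS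
    have ihi := ih i.toNat
    rw [hitn] at ihi
    unfold pvSieveStep
    by_cases h : S.getD i.toNat false = true
    · rw [if_pos h]
      rw [pv_getD_markMultiples n i hi2 S m, ih m, pvMarked_succ i (m : Int) hi2]
      have hii := ihi.mp h
      constructor
      · rintro ⟨hnd, hmn, hnm⟩
        exact ⟨hmn, by tauto⟩
      · rintro ⟨hmn, hnm⟩
        refine ⟨fun hc => hnm (Or.inr ⟨hc.1, hc.2.1⟩), hmn, fun hc => hnm (Or.inl hc)⟩
    · rw [if_neg h]
      rw [ih m, pvMarked_succ i (m : Int) hi2]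
      have hcase : ¬((i : Int) ≤ n ∧ ¬ pvMarked i i) := fun hc => h (ihi.mpr hc)
      constructor
      · rintro ⟨hmn, hnm⟩
        refine ⟨hmn, ?_⟩
        rintro (hc | ⟨hd, hsq⟩)
        · exact hnm hc
        · rcases not_and_or.mp hcase with hgt | hmk
          · have : i ≤ i * i := by nlinarith
            omega
          · obtain ⟨t, t1, t2, t3, t4⟩ := not_not.mp hmk
            exact hnm ⟨t, t1, t2, t3.trans hd, by nlinarith⟩
      · rintro ⟨hmn, hnm⟩
        exact ⟨hmn, fun hc => hnm (Or.inl hc)⟩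

theorem pvMarked_iff_not_prime (n j : Int) (h2 : 2 ≤ j) (hjn : j ≤ n) :
    pvMarked ((Nat.sqrt n.toNat : Int) + 1) j ↔ ¬ Nat.Prime j.toNat := by
  constructor
  · rintro ⟨t, h1, _, h3, h4⟩
    intro hp
    have htj : t < j := by nlinarith
    have ht0 : 0 ≤ t := by omega
    have hdn : t.toNat ∣ j.toNat := by
      rw [← Int.natCast_dvd_natCast, Int.toNat_of_nonneg ht0, Int.toNat_of_nonneg (by omega)]
      exact h3
    rcases (Nat.Prime.eq_one_or_self_of_dvd hp t.toNat hdn) with h | h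
    · omega
    · omega
  · intro hp
    have hj0 : 0 < j.toNat := by omega
    have hpf := Nat.minFac_prime (show j.toNat ≠ 1 by omega)
    have hdvd := Nat.minFac_dvd j.toNat
    have hsq := Nat.minFac_sq_le_self hj0 hp
    set p := j.toNat.minFac with hpdef
    have hp2 := hpf.two_le
    refine ⟨(p : Int), by exact_mod_cast hp2, ?_, ?_, ?_⟩
    · have : p ≤ Nat.sqrt n.toNat := by
        rw [Nat.le_sqrt]
        calc p * p = p ^ 2 := (sq p).symm
        _ ≤ j.toNat := hsq
        _ ≤ n.toNat := by omega
      omega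
    · rw [show j = ((j.toNat : Int)) from (Int.toNat_of_nonneg (by omega)).symm]
      exact_mod_cast hdvd
    · have : (p * p : Nat) ≤ j.toNat := by nlinarith [hsq]
      omega

theorem pvTrialPrime_iff (i : Int) (h2 : 2 ≤ i) : pvTrialPrime i = true ↔ Nat.Prime i.toNat := by
  unfold pvTrialPrime
  rw [List.all_eq_true]
  have hmod : ∀ j : Int, 2 ≤ j → ((PySem.Int.mod i j != 0) = true ↔ ¬ j ∣ i) := by
    intro j hj
    have hfm : PySem.Int.mod i j = i % j := by
      show i.fmod j = i % j
      rw [Int.fmod_eq_emod]; simp [show (0:Int) ≤ j by omega]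
    rw [hfm, bne_iff_ne, ne_eq]
    have hiff : i % j = 0 ↔ j ∣ i :=
      ⟨fun h => Int.dvd_of_emod_eq_zero h, fun h => Int.emod_eq_zero_of_dvd h⟩
    exact not_congr hiff
  rw [Nat.prime_def_le_sqrt]
  constructor
  · intro h
    refine ⟨by omega, fun m hm hms hmd => ?_⟩
    have hmem : ((m : Int)) ∈ PySem.List.pyRange 2 ((Nat.sqrt i.toNat : Int) + 1) := by
      rw [PySem.List.mem_pyRange_one]
      constructor
      · exact_mod_cast hm
      · omega
    have := (hmod (m : Int) (by exact_mod_cast hm)).mp (h _ hmem)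
    apply this
    rw [show i = ((i.toNat : Int)) from (Int.toNat_of_nonneg (by omega)).symm]
    exact_mod_cast hmd
  · rintro ⟨_, h⟩ j hj
    rw [PySem.List.mem_pyRange_one] at hj
    rw [hmod j hj.1]
    intro hd
    have hj0 : 0 ≤ j := by omega
    apply h j.toNat (by omega) (by omega)
    rw [← Int.natCast_dvd_natCast, Int.toNat_of_nonneg hj0, Int.toNat_of_nonneg (by omega)]
    exact hd

-- ===== VERDICT (by name: the statement is the Claim_ definition above) =====
theorem getAllPrimes_spec : Claim_equal_getAllPrimes := by
  intro n d _ hpre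
  unfold Pre_getAllPrimes at hpre
  unfold Spec_getAllPrimes
  simp only [getAllPrimes, getAllPrimes_alt]
  by_cases hn2 : n < 2
  · rw [PySem.List.pyRange_one_eq_nil (show n + 1 ≤ 2 by omega)]
    simp
  · apply PySem.List.foldl_congr_mem
    intro acc i hi
    rw [PySem.List.mem_pyRange_one] at hi
    obtain ⟨hi2, hin⟩ := hi
    have hitn : ((i.toNat : Int)) = i := Int.toNat_of_nonneg (by omega)
    have hsq1 : 1 ≤ Nat.sqrt n.toNat := Nat.sqrt_pos.mpr (by omega)
    have hb : ((Nat.sqrt n.toNat : Int) + 1) = 2 + (((Nat.sqrt n.toNat - 1 : Nat)) : Int) := by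
      omega
    have hA : ((PySem.List.pyRange 2 ((Nat.sqrt n.toNat : Int) + 1)).foldl (pvSieveStep n)
        (List.replicate (n + 1).toNat true)).getD i.toNat false = true ↔ Nat.Prime i.toNat := by
      rw [hb, pvSieve_inv n hpre (Nat.sqrt n.toNat - 1) i.toNat, hitn, ← hb,
        pvMarked_iff_not_prime n i hi2 (by omega)]
      constructor
      · rintro ⟨_, hnp⟩; exact not_not.mp hnp
      · intro hp; exact ⟨by omega, not_not.mpr hp⟩
    have hEq : ((PySem.List.pyRange 2 ((Nat.sqrt n.toNat : Int) + 1)).foldl (pvSieveStep n)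
        (List.replicate (n + 1).toNat true)).getD i.toNat false = pvTrialPrime i := by
      rw [Bool.eq_iff_iff, hA, pvTrialPrime_iff i hi2]
    rw [hEq]

theorem getAllPrimes_raises : Claim_raises_getAllPrimes := by
  unfold Claim_raises_getAllPrimes
  exact ⟨by intro n d _ hr; unfold Pre_getAllPrimes; unfold Raises_getAllPrimes at hr; omega, by decide⟩

theorem pvRaiseWitness_ok :
    Raises_getAllPrimes pvRaiseWitness_getAllPrimes.1 pvRaiseWitness_getAllPrimes.2 ∧
    getAllPrimes_alt pvRaiseWitness_getAllPrimes.1 pvRaiseWitness_getAllPrimes.2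
      = pvRaiseWitnessOut_getAllPrimes :=
  ⟨getAllPrimes_raises.2.2.1, getAllPrimes_raises.2.2.2⟩
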